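-- pv_equiv track=rewrite | github.com/Atalanta/ynam | ynam/domain/transactions.py | analyze_csv_columns
-- ===== SOURCE A (Python) =====
-- def analyze_csv_columns(headers: list[str]) -> dict[str, str]:
--     """Analyze CSV headers and suggest column mappings.
--
--     Args:
--         headers: List of CSV column names.
--
--     Returns:
--         Dictionary with suggested mappings for date, description, amount (empty string if not detected).
--     """
--     mappings: dict[str, str] = {
--         "date": "",
--         "description": "",
--         "amount": "",
--     }
--
--     headers_lower = [h.lower() for h in headers]
--
--     for i, header in enumerate(headers_lower):
--         if not mappings["date"] and "date" in header:
--             mappings["date"] = headers[i]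
--
--         if not mappings["description"]:
--             if "merchant" in header and "name" in header:
--                 mappings["description"] = headers[i]
--             elif "description" in header:
--                 mappings["description"] = headers[i]
--
--         if not mappings["amount"] and "amount" in header and "currency" not in header:
--             mappings["amount"] = headers[i]
--
--     return mappings
-- ===== SOURCE B (Python) =====
-- def analyze_csv_columns(headers: list[str]) -> dict[str, str]:
--     """Suggest column mappings by three independent first-match searches."""
--     def first(pred):
--         return next((h for h in headers if pred(h.lower())), "")
--     return {
--         "date": first(lambda h: "date" in h),
--         "description": first(lambda h: ("merchant" in h and "name" in h) or "description" in h),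
--         "amount": first(lambda h: "amount" in h and "currency" not in h),
--     }
-- ===== Notes on version B (the rewrite author's own statement) =====
-- stated objective: simpler
-- what changed: Replaces the single flag-guarded pass that mutates a dict with three independent first-match searches (one per field) whose results are assembled into the dict directly.
import Mathlib
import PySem

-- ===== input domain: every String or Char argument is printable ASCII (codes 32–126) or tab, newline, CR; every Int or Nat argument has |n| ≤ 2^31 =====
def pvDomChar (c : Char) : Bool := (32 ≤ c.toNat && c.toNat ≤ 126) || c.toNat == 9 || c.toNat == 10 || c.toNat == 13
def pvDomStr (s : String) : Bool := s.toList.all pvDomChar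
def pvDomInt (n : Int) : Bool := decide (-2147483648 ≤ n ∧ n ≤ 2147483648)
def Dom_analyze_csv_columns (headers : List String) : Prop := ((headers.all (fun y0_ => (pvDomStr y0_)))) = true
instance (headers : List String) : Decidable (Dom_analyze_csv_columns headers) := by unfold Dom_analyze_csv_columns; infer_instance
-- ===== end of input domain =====

-- B replaces A's single flag-guarded dict-mutating pass by three independent first-match searches (objective: simpler decomposition).

-- ===== PORT A =====
-- literal transliteration: the dict literal, the headers_lower list, and one loop over
-- (original, lowered) pairs performing the three guarded in-place updates in order.
-- bodyA is the loop body, named so the proofs can speak about one iteration.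
def bodyA (m : PySem.Dict String String) (p : String × String) : PySem.Dict String String :=
  let orig := p.1
  let header := p.2
  let m := if (m.getD "date" "" == "") && PySem.Str.isIn "date" header then
             m.insert "date" orig else m
  let m := if (m.getD "description" "" == "") then
             (if PySem.Str.isIn "merchant" header && PySem.Str.isIn "name" header then
                m.insert "description" orig
              else if PySem.Str.isIn "description" header then
                m.insert "description" orig
              else m)
           else m
  let m := if (m.getD "amount" "" == "") &&
              (PySem.Str.isIn "amount" header && !(PySem.Str.isIn "currency" header)) then
             m.insert "amount" orig else m
  m

def analyze_csv_columns (headers : List String) : List (String × String) :=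
  let m0 : PySem.Dict String String :=
    PySem.Dict.ofList [("date", ""), ("description", ""), ("amount", "")]
  let headersLower := headers.map PySem.Str.lower
  let m := (headers.zip headersLower).foldl bodyA m0
  m.items

-- ===== PORT B =====
-- first original-case header whose lowercased form satisfies pred, else ""
def firstMatch (headers : List String) (pred : String → Bool) : String :=
  match headers with
  | [] => ""
  | h :: t => if pred (PySem.Str.lower h) then h else firstMatch t pred

def analyze_csv_columns_alt (headers : List String) : List (String × String) :=
  [("date", firstMatch headers (fun h => PySem.Str.isIn "date" h)),
   ("description", firstMatch headers (fun h =>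
      (PySem.Str.isIn "merchant" h && PySem.Str.isIn "name" h) || PySem.Str.isIn "description" h)),
   ("amount", firstMatch headers (fun h =>
      PySem.Str.isIn "amount" h && !(PySem.Str.isIn "currency" h)))]

-- ===== PRECONDITION & SPEC =====
def Spec_analyze_csv_columns (headers : List String) (out : List (String × String)) : Prop := out = analyze_csv_columns_alt headers
instance (headers : List String) (out : List (String × String)) : Decidable (Spec_analyze_csv_columns headers out) := by unfold Spec_analyze_csv_columns; infer_instance

-- ===== CLAIM (what is proved, stated in full; the proofs are below) =====
def Claim_equal_analyze_csv_columns : Prop := ∀ (headers : List String), Dom_analyze_csv_columns headers → Spec_analyze_csv_columns headers (analyze_csv_columns headers)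

-- ===== LEMMAS AND PROOFS =====

-- A's fold step, reading only the three known keys, kept as a triple of values
def stepOne (pred : String → Bool) (v : String) (p : String × String) : String :=
  if (v == "") && pred p.2 then p.1 else v

def predDate (h : String) : Bool := PySem.Str.isIn "date" h
def predDesc (h : String) : Bool :=
  (PySem.Str.isIn "merchant" h && PySem.Str.isIn "name" h) || PySem.Str.isIn "description" h
def predAmt (h : String) : Bool :=
  PySem.Str.isIn "amount" h && !(PySem.Str.isIn "currency" h)

-- one guarded "date" update on the three-key literal dict, as an if on the value
theorem dStep (d s a o : String) (c : Bool) :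
    (if ((PySem.Dict.mk [("date", d), ("description", s), ("amount", a)]).getD "date" "" == "") && c then
       (PySem.Dict.mk [("date", d), ("description", s), ("amount", a)]).insert "date" o
     else PySem.Dict.mk [("date", d), ("description", s), ("amount", a)]) =
    PySem.Dict.mk [("date", if (d == "") && c then o else d), ("description", s), ("amount", a)] := by
  have hg : (PySem.Dict.mk [("date", d), ("description", s), ("amount", a)]).getD "date" "" = d := rfl
  rw [hg]
  by_cases h : ((d == "") && c) = true
  · rw [if_pos h, if_pos h]; rfl
  · rw [if_neg h, if_neg h]

-- the guarded "description" update (two-branch inner if) on the literal dict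
theorem sStep (x s a o : String) (b1 b2 : Bool) :
    (if ((PySem.Dict.mk [("date", x), ("description", s), ("amount", a)]).getD "description" "" == "") then
       (if b1 then (PySem.Dict.mk [("date", x), ("description", s), ("amount", a)]).insert "description" o
        else if b2 then (PySem.Dict.mk [("date", x), ("description", s), ("amount", a)]).insert "description" o
        else PySem.Dict.mk [("date", x), ("description", s), ("amount", a)])
     else PySem.Dict.mk [("date", x), ("description", s), ("amount", a)]) =
    PySem.Dict.mk [("date", x), ("description", if (s == "") && (b1 || b2) then o else s), ("amount", a)] := by
  have hg : (PySem.Dict.mk [("date", x), ("description", s), ("amount", a)]).getD "description" "" = s := rfl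
  rw [hg]
  by_cases h : (s == "") = true <;> by_cases hb1 : b1 = true <;> by_cases hb2 : b2 = true <;>
    simp [h, hb1, hb2] <;> rfl

-- the guarded "amount" update on the literal dict
theorem aStep (x y a o : String) (c : Bool) :
    (if ((PySem.Dict.mk [("date", x), ("description", y), ("amount", a)]).getD "amount" "" == "") && c then
       (PySem.Dict.mk [("date", x), ("description", y), ("amount", a)]).insert "amount" o
     else PySem.Dict.mk [("date", x), ("description", y), ("amount", a)]) =
    PySem.Dict.mk [("date", x), ("description", y), ("amount", if (a == "") && c then o else a)] := by
  have hg : (PySem.Dict.mk [("date", x), ("description", y), ("amount", a)]).getD "amount" "" = a := rfl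
  rw [hg]
  by_cases h : ((a == "") && c) = true
  · rw [if_pos h, if_pos h]; rfl
  · rw [if_neg h, if_neg h]

-- One step of A's loop body on a dict with exactly the three literal keys updates componentwise.
theorem step_eq (p : String × String) (d s a : String) :
    bodyA (PySem.Dict.mk [("date", d), ("description", s), ("amount", a)]) p =
    PySem.Dict.mk [("date", stepOne predDate d p),
                   ("description", stepOne predDesc s p),
                   ("amount", stepOne predAmt a p)] := by
  unfold bodyA
  dsimp only
  rw [dStep, sStep, aStep]
  simp only [stepOne, predDate, predDesc, predAmt]
  rfl

-- On a dict with exactly the three literal keys, A's fold acts componentwise.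
theorem fold_dict_eq (l : List (String × String)) (d s a : String) :
    l.foldl bodyA (PySem.Dict.mk [("date", d), ("description", s), ("amount", a)]) =
    PySem.Dict.mk [("date", l.foldl (stepOne predDate) d),
                   ("description", l.foldl (stepOne predDesc) s),
                   ("amount", l.foldl (stepOne predAmt) a)] := by
  induction l generalizing d s a with
  | nil => rfl
  | cons p t ih =>
    rw [List.foldl_cons, step_eq, ih]
    rfl

-- stepOne never re-fires once set, provided pred rejects ""
theorem foldl_stepOne_ne (pred : String → Bool) (l : List (String × String)) (v : String)
    (hv : v ≠ "") : l.foldl (stepOne pred) v = v := by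
  induction l with
  | nil => rfl
  | cons p t ih =>
    simp only [List.foldl_cons, stepOne]
    have : (v == "") = false := by simpa using hv
    simp [this, ih]

theorem foldl_stepOne_eq_firstMatch (pred : String → Bool) (hpred : pred "" = false)
    (hs : List String) :
    (hs.zip (hs.map PySem.Str.lower)).foldl (stepOne pred) "" = firstMatch hs pred := by
  induction hs with
  | nil => rfl
  | cons h t ih =>
    simp only [List.map_cons, List.zip_cons_cons, List.foldl_cons, firstMatch, stepOne]
    by_cases hp : pred (PySem.Str.lower h) = true
    · have hne : h ≠ "" := by
        intro he; subst he
        rw [show PySem.Str.lower "" = "" from rfl] at hp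
        simp [hpred] at hp
      simp [hp, foldl_stepOne_ne pred _ _ hne]
    · simp [hp, ih]

-- ===== VERDICT (by name: the statement is the Claim_ definition above) =====
theorem analyze_csv_columns_spec : Claim_equal_analyze_csv_columns := by
  intro headers _
  unfold Spec_analyze_csv_columns analyze_csv_columns analyze_csv_columns_alt
  simp only []
  rw [show PySem.Dict.ofList [("date", ""), ("description", ""), ("amount", "")] =
      PySem.Dict.mk [("date", ""), ("description", ""), ("amount", "")] from rfl]
  rw [fold_dict_eq]
  rw [foldl_stepOne_eq_firstMatch predDate rfl,
      foldl_stepOne_eq_firstMatch predDesc rfl,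
      foldl_stepOne_eq_firstMatch predAmt rfl]
  rfl
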